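-- pv_equiv track=rewrite | github.com/nomindnick/CLaiM | backend/modules/document_processor/boundary_validation.py | _calculate_word_positions
-- ===== SOURCE A (Python) =====
-- from typing import List, Tuple, Dict, Any, Optional
--
-- def _calculate_word_positions(text: str) -> List[int]:
--     """Calculate character positions for each word.
--
--     Args:
--         text: Input text
--
--     Returns:
--         List of character positions for each word start
--     """
--     positions = []
--     current_pos = 0
--
--     for word in text.split():
--         # Find word in text starting from current position
--         word_start = text.find(word, current_pos)
--         if word_start != -1:
--             positions.append(word_start)
--             current_pos = word_start + len(word)
--         else:
--             # Fallback: estimate position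
--             positions.append(current_pos)
--             current_pos += len(word) + 1
--
--     return positions
-- ===== SOURCE B (Python) =====
-- import re
-- from typing import List
--
-- def _calculate_word_positions(text: str) -> List[int]:
--     """Character start position of each whitespace-separated word."""
--     return [m.start() for m in re.finditer(r'\S+', text)]
-- ===== Notes on version B (the rewrite author's own statement) =====
-- stated objective: idiomatic
-- what changed: B replaces the split/str.find/current_pos accumulator loop (with its unreachable -1 fallback) by a single regex scan, reading each word's start directly from re.finditer(r'\S+', text).
import Mathlib
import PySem

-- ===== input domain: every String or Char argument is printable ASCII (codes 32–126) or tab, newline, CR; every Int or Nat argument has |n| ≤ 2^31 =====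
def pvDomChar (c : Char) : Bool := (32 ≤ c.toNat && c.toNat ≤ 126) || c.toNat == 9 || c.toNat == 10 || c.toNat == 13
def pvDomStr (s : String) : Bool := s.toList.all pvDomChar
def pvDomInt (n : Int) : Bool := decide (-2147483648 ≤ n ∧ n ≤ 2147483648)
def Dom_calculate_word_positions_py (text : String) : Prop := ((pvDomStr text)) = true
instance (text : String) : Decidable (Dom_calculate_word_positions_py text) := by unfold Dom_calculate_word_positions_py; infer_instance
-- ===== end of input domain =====

-- B replaces A's split/str.find/current_pos accumulator loop by a single left-to-right scan for
-- the starts of non-whitespace runs (Python: re.finditer(r'\S+', text)); equal on every input.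

-- ===== PORT A =====
-- A's for-loop over text.split(): the appended positions become the cons-recursion on the word list,
-- the state (current_pos) is the second argument; both branches of A's `if word_start != -1` kept.
def calcA_go (text : String) : List String → Int → List Int
  | [], _ => []
  | w :: ws, cur =>
    let word_start := PySem.Str.findFrom text w cur none
    if word_start ≠ -1 then
      word_start :: calcA_go text ws (word_start + PySem.Str.len w)
    else
      cur :: calcA_go text ws (cur + PySem.Str.len w + 1)

def calculate_word_positions_py (text : String) : List Int :=
  calcA_go text (PySem.Str.split₀ text) 0

-- ===== PORT B =====
-- Source B's re.finditer(r'\S+', text): scan the characters once; emit the index of each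
-- non-whitespace character whose predecessor is whitespace (or start of string).
def calcB_go : List Char → Nat → Bool → List Int
  | [], _, _ => []
  | c :: rest, i, prevWs =>
    if PySem.Chars.isspace c then calcB_go rest (i + 1) true
    else if prevWs then (i : Int) :: calcB_go rest (i + 1) false
    else calcB_go rest (i + 1) false

def calculate_word_positions_py_alt (text : String) : List Int :=
  calcB_go text.toList 0 true

-- ===== PRECONDITION & SPEC =====
def Spec_calculate_word_positions_py (text : String) (out : List Int) : Prop := out = calculate_word_positions_py_alt text
instance (text : String) (out : List Int) : Decidable (Spec_calculate_word_positions_py text out) := by unfold Spec_calculate_word_positions_py; infer_instance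

-- ===== CLAIM (what is proved, stated in full; the proofs are below) =====
def Claim_equal_calculate_word_positions_py : Prop := ∀ (text : String), Dom_calculate_word_positions_py text → Spec_calculate_word_positions_py text (calculate_word_positions_py text)

-- ===== LEMMAS AND PROOFS =====

-- A's loop rewritten over char lists (proof-side helper mirroring calcA_go).
def calcAC_go (text : List Char) : List (List Char) → Int → List Int
  | [], _ => []
  | w :: ws, cur =>
    let word_start := PySem.Chars.findFrom text w cur none
    if word_start ≠ -1 then
      word_start :: calcAC_go text ws (word_start + (w.length : Int))
    else
      cur :: calcAC_go text ws (cur + (w.length : Int) + 1)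

lemma calcA_eq_AC (text : String) : ∀ (ws : List String) (cur : Int),
    calcA_go text ws cur = calcAC_go text.toList (ws.map String.toList) cur := by
  intro ws
  induction ws with
  | nil => intro cur; rfl
  | cons w ws ih =>
    intro cur
    simp only [calcA_go, calcAC_go, List.map_cons, PySem.Str.findFrom_eq, PySem.Str.len_eq, ih]

-- scanning behaviour of calcB_go
lemma calcB_all_space : ∀ (cs : List Char) (i : Nat),
    (∀ c ∈ cs, PySem.Chars.isspace c = true) → calcB_go cs i true = [] := by
  intro cs
  induction cs with
  | nil => intro i _; rfl
  | cons c rest ih =>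
    intro i h
    simp only [calcB_go, h c (List.mem_cons_self), if_pos]
    exact ih _ (fun x hx => h x (List.mem_cons_of_mem _ hx))

lemma calcB_space_prefix : ∀ (ws t : List Char) (i : Nat),
    (∀ c ∈ ws, PySem.Chars.isspace c = true) →
    calcB_go (ws ++ t) i true = calcB_go t (i + ws.length) true := by
  intro ws
  induction ws with
  | nil => intro t i _; simp
  | cons c rest ih =>
    intro t i h
    simp only [List.cons_append, calcB_go, h c (List.mem_cons_self), if_pos]
    rw [ih _ _ (fun x hx => h x (List.mem_cons_of_mem _ hx))]
    congr 1
    simp [List.length_cons]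
    omega

lemma calcB_false_of_boundary (t : List Char) (i : Nat)
    (h : t = [] ∨ ∃ c r, t = c :: r ∧ PySem.Chars.isspace c = true) :
    calcB_go t i false = calcB_go t i true := by
  rcases h with h | ⟨c, r, rfl, hc⟩
  · subst h; rfl
  · simp [calcB_go, hc]

lemma calcB_nonspace : ∀ (w t : List Char) (i : Nat),
    (∀ c ∈ w, PySem.Chars.isspace c = false) →
    calcB_go (w ++ t) i false = calcB_go t (i + w.length) false := by
  intro w
  induction w with
  | nil => intro t i _; simp
  | cons c rest ih =>
    intro t i h
    simp only [List.cons_append, calcB_go, h c (List.mem_cons_self), if_neg, Bool.false_eq_true,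
      not_false_iff]
    rw [ih _ _ (fun x hx => h x (List.mem_cons_of_mem _ hx))]
    congr 1
    simp [List.length_cons]
    omega

lemma calcB_word (w t : List Char) (i : Nat) (hne : w ≠ [])
    (h : ∀ c ∈ w, PySem.Chars.isspace c = false) :
    calcB_go (w ++ t) i true = (i : Int) :: calcB_go t (i + w.length) false := by
  cases w with
  | nil => exact absurd rfl hne
  | cons c rest =>
    simp only [List.cons_append, calcB_go, h c (List.mem_cons_self), if_neg, Bool.false_eq_true,
      not_false_iff, if_pos]
    rw [calcB_nonspace rest t (i + 1) (fun x hx => h x (List.mem_cons_of_mem _ hx))]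
    congr 2
    simp [List.length_cons]
    omega

-- split₀.go bookkeeping
lemma splitgo_acc : ∀ (s : List Char) (cur : List Char) (acc : List (List Char)),
    PySem.Chars.split₀.go s cur acc = acc.reverse ++ PySem.Chars.split₀.go s cur [] := by
  intro s
  induction s with
  | nil =>
    intro cur acc
    simp only [PySem.Chars.split₀.go]
    by_cases h : cur.isEmpty <;> simp [h]
  | cons c rest ih =>
    intro cur acc
    by_cases hc : PySem.Chars.isspace c
    · by_cases hcur : cur.isEmpty
      · simp only [PySem.Chars.split₀.go, hc, hcur, if_pos]
        exact ih _ _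
      · simp only [PySem.Chars.split₀.go, hc, hcur, if_pos, Bool.false_eq_true, if_false]
        rw [ih [] (cur.reverse :: acc), ih [] [cur.reverse]]
        simp
    · simp only [PySem.Chars.split₀.go, hc, Bool.false_eq_true, if_false]
      exact ih _ _

lemma splitgo_space_prefix : ∀ (ws t : List Char) (acc : List (List Char)),
    (∀ c ∈ ws, PySem.Chars.isspace c = true) →
    PySem.Chars.split₀.go (ws ++ t) [] acc = PySem.Chars.split₀.go t [] acc := by
  intro ws
  induction ws with
  | nil => intro t acc _; simp
  | cons c rest ih =>
    intro t acc h
    simp only [List.cons_append, PySem.Chars.split₀.go, h c (List.mem_cons_self), if_pos,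
      List.isEmpty_nil]
    exact ih _ _ (fun x hx => h x (List.mem_cons_of_mem _ hx))

lemma splitgo_word_prefix : ∀ (w t cur : List Char) (acc : List (List Char)),
    (∀ c ∈ w, PySem.Chars.isspace c = false) →
    PySem.Chars.split₀.go (w ++ t) cur acc = PySem.Chars.split₀.go t (w.reverse ++ cur) acc := by
  intro w
  induction w with
  | nil => intro t cur acc _; simp
  | cons c rest ih =>
    intro t cur acc h
    simp only [List.cons_append, PySem.Chars.split₀.go, h c (List.mem_cons_self),
      Bool.false_eq_true, if_false]
    rw [ih _ _ _ (fun x hx => h x (List.mem_cons_of_mem _ hx))]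
    simp

lemma split₀_decomp (ws w rest : List Char)
    (hws : ∀ c ∈ ws, PySem.Chars.isspace c = true)
    (hw : ∀ c ∈ w, PySem.Chars.isspace c = false) (hne : w ≠ [])
    (hrest : rest = [] ∨ ∃ c r, rest = c :: r ∧ PySem.Chars.isspace c = true) :
    PySem.Chars.split₀ (ws ++ w ++ rest) = w :: PySem.Chars.split₀ rest := by
  unfold PySem.Chars.split₀
  rw [List.append_assoc, splitgo_space_prefix ws (w ++ rest) [] hws,
    splitgo_word_prefix w rest [] [] hw]
  rcases hrest with rfl | ⟨c, r, rfl, hc⟩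
  · simp only [PySem.Chars.split₀.go, List.append_nil, List.reverse_reverse]
    simp [hne]
  · simp only [PySem.Chars.split₀.go, hc, if_pos,
      List.isEmpty_nil, List.append_nil, List.reverse_reverse]
    rw [splitgo_acc r [] [w]]
    simp
    exact hne

-- the first occurrence of w in ws ++ w ++ rest at/after 0 is at ws.length
lemma find_run (ws w rest : List Char)
    (hws : ∀ c ∈ ws, PySem.Chars.isspace c = true)
    (hw : ∀ c ∈ w, PySem.Chars.isspace c = false) (hne : w ≠ []) :
    PySem.Chars.find (ws ++ w ++ rest) w = (ws.length : Int) := by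
  have hocc : w <+: List.drop ws.length (ws ++ w ++ rest) := by
    rw [List.append_assoc, List.drop_left]
    exact ⟨rest, rfl⟩
  have hnn : 0 ≤ PySem.Chars.find (ws ++ w ++ rest) w := by
    rw [PySem.Chars.find_nonneg_iff]
    exact ⟨ws, rest, rfl⟩
  obtain ⟨hpre, hfirst⟩ := PySem.Chars.find_spec hnn
  set f := (PySem.Chars.find (ws ++ w ++ rest) w).toNat with hf
  have hle : f ≤ ws.length := by
    by_contra hgt
    exact hfirst ws.length (by omega) hocc
  have heq : f = ws.length := by
    rcases Nat.lt_or_ge f ws.length with hlt | hge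
    · exfalso
      -- an occurrence at f < ws.length would put w's (non-space) head on a space
      obtain ⟨c0, wrest, hw0⟩ := List.exists_cons_of_ne_nil hne
      obtain ⟨t, ht⟩ := hpre
      have hgetw : (List.drop f (ws ++ w ++ rest)).head? = some c0 := by
        rw [← ht, hw0]; rfl
      have hdrop : List.drop f (ws ++ w ++ rest) = List.drop f ws ++ (w ++ rest) := by
        rw [List.append_assoc, List.drop_append_of_le_length (le_of_lt hlt)]
      have hgets : (List.drop f (ws ++ w ++ rest)).head? = some (ws[f]'hlt) := by
        rw [hdrop, List.head?_append_of_ne_nil _ (by simp [List.drop_eq_nil_iff]; omega)]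
        simp [List.head?_drop]
      rw [hgetw] at hgets
      have hceq : c0 = ws[f]'hlt := Option.some_inj.mp hgets
      have hsp := hws (ws[f]'hlt) (List.getElem_mem hlt)
      have hf0 := hw c0 (by rw [hw0]; exact List.mem_cons_self)
      rw [hceq, hsp] at hf0
      cases hf0
    · omega
  omega

-- if dropWhile p l starts with d, then p d is false
lemma dropWhile_head_false (p : Char → Bool) : ∀ (l : List Char) (d : Char) (t : List Char),
    List.dropWhile p l = d :: t → p d = false := by
  intro l
  induction l with
  | nil => intro d t h; simp at h
  | cons c r ih =>
    intro d t h
    by_cases hc : p c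
    · rw [List.dropWhile_cons_of_pos hc] at h
      exact ih d t h
    · rw [List.dropWhile_cons_of_neg hc] at h
      obtain ⟨rfl, -⟩ := List.cons.injEq .. ▸ h
      cases h
      simpa using hc

-- MAIN: A's loop over split₀ cs, searching pre ++ cs from index pre.length, equals B's scan of cs
lemma main_aux : ∀ (n : Nat) (cs : List Char), cs.length ≤ n → ∀ (pre : List Char),
    calcAC_go (pre ++ cs) (PySem.Chars.split₀ cs) (pre.length : Int) =
      calcB_go cs pre.length true := by
  intro n
  induction n with
  | zero =>
    intro cs h pre
    have : cs = [] := List.eq_nil_of_length_eq_zero (by omega)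
    subst this
    rfl
  | succ n ih =>
    intro cs h pre
    have hwt := List.takeWhile_append_dropWhile (p := PySem.Chars.isspace) (l := cs)
    obtain ⟨ws, hws_def⟩ : ∃ ws, ws = List.takeWhile PySem.Chars.isspace cs := ⟨_, rfl⟩
    have hws : ∀ c ∈ ws, PySem.Chars.isspace c = true := by
      intro c hc; rw [hws_def] at hc; exact List.mem_takeWhile_imp hc
    rcases ht : List.dropWhile PySem.Chars.isspace cs with _ | ⟨d, t0⟩
    · -- cs is all whitespace: split() is empty, and B emits nothing
      rw [ht, List.append_nil] at hwt
      have hall : ∀ c ∈ cs, PySem.Chars.isspace c = true := by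
        intro c hc
        rw [← hwt] at hc
        exact List.mem_takeWhile_imp hc
      have hsplit : PySem.Chars.split₀ cs = [] := by
        unfold PySem.Chars.split₀
        have h2 := splitgo_space_prefix cs [] [] hall
        rw [List.append_nil] at h2
        rw [h2]
        rfl
      rw [hsplit, calcB_all_space cs pre.length hall]
      rfl
    · -- cs = ws ++ w ++ rest with w the first word
      rw [ht] at hwt
      have hd : PySem.Chars.isspace d = false := dropWhile_head_false _ cs d t0 ht
      obtain ⟨w, hw_def⟩ :
          ∃ w, w = List.takeWhile (fun c => !PySem.Chars.isspace c) (d :: t0) := ⟨_, rfl⟩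
      obtain ⟨rest, hrest_def⟩ :
          ∃ r, r = List.dropWhile (fun c => !PySem.Chars.isspace c) (d :: t0) := ⟨_, rfl⟩
      have hwval : ∀ c ∈ w, PySem.Chars.isspace c = false := by
        intro c hc
        rw [hw_def] at hc
        have := List.mem_takeWhile_imp hc
        simpa using this
      have hwne : w ≠ [] := by
        rw [hw_def]
        simp [hd]
      have hrest : rest = [] ∨ ∃ c r, rest = c :: r ∧ PySem.Chars.isspace c = true := by
        rcases hr : rest with _ | ⟨e, r⟩
        · exact Or.inl rfl
        · refine Or.inr ⟨e, r, rfl, ?_⟩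
          have := dropWhile_head_false (fun c => !PySem.Chars.isspace c) (d :: t0) e r
            (by rw [← hrest_def, hr])
          simpa using this
      have hcs2 : cs = ws ++ w ++ rest := by
        rw [hws_def, hw_def, hrest_def, List.append_assoc, List.takeWhile_append_dropWhile]
        exact hwt.symm
      have hlen : rest.length ≤ n := by
        have h1 : cs.length = ws.length + w.length + rest.length := by
          rw [hcs2]; simp only [List.length_append]
        have h2 : 0 < w.length := List.length_pos_of_ne_nil hwne
        omega
      -- LHS: one step of A's loop
      rw [hcs2, split₀_decomp ws w rest hws hwval hwne hrest]
      have hk : pre.length ≤ (pre ++ (ws ++ w ++ rest)).length := by simp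
      have hfind : PySem.Chars.findFrom (pre ++ (ws ++ w ++ rest)) w (pre.length : Int) none =
          (pre.length : Int) + (ws.length : Int) := by
        rw [PySem.Chars.findFrom_natCast _ _ pre.length hk, List.drop_left,
          find_run ws w rest hws hwval hwne]
        have hne2 : ((ws.length : Int)) ≠ -1 := by omega
        simp [hne2]
      simp only [calcAC_go, hfind]
      have hne1 : (pre.length : Int) + (ws.length : Int) ≠ -1 := by omega
      rw [if_pos hne1]
      -- the recursive call, with pre' = pre ++ ws ++ w
      have hihc := ih rest hlen (pre ++ ws ++ w)
      rw [show (pre ++ ws ++ w) ++ rest = pre ++ (ws ++ w ++ rest) by simp] at hihc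
      rw [show ((pre ++ ws ++ w).length : Int) =
          (pre.length : Int) + (ws.length : Int) + (w.length : Int) by
        simp only [List.length_append]; push_cast; ring] at hihc
      rw [show (pre ++ ws ++ w).length = pre.length + ws.length + w.length by
        simp only [List.length_append]] at hihc
      rw [hihc]
      -- RHS: B's scan crosses ws, then the word w, then continues on rest
      rw [show ws ++ w ++ rest = ws ++ (w ++ rest) by simp,
        calcB_space_prefix ws (w ++ rest) _ hws,
        calcB_word w rest _ hwne hwval,
        calcB_false_of_boundary rest _ hrest]
      rw [show ((pre.length + ws.length : Nat) : Int) =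
        (pre.length : Int) + (ws.length : Int) by push_cast; ring]

-- ===== VERDICT (by name: the statement is the Claim_ definition above) =====
theorem calculate_word_positions_py_spec : Claim_equal_calculate_word_positions_py := by
  intro text _
  unfold Spec_calculate_word_positions_py calculate_word_positions_py calculate_word_positions_py_alt
  rw [calcA_eq_AC, PySem.Str.split₀_map_toList]
  have h := main_aux text.toList.length text.toList le_rfl []
  simpa using h
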